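-- pv_equiv track=rewrite | github.com/PSFC-HEDP/MRSt | src/python/view_ensemble.py | text_wrap
-- ===== SOURCE A (Python) =====
-- def text_wrap(s):
-- 	if len(s) > 14:
-- 		i = len(s)//2
-- 		for j in range(i):
-- 			if s[i+j] == ' ':
-- 				return s[:i+j] + '\n' + s[i+j+1:]
-- 			elif s[i-j] == ' ':
-- 				return s[:i-j] + '\n' + s[i-j+1:]
-- 	return s
-- ===== SOURCE B (Python) =====
-- def text_wrap(s):
--     if len(s) <= 14:
--         return s
--     i = len(s) // 2
--     spaces = [p for p in range(1, 2*i) if s[p] == ' ']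
--     if not spaces:
--         return s
--     p = min(spaces, key=lambda p: (abs(p - i), -p))
--     return s[:p] + '\n' + s[p+1:]
-- ===== Notes on version B (the rewrite author's own statement) =====
-- stated objective: simpler
-- what changed: Replaces the outward two-pointer scan with early returns by a build-then-select decomposition: collect the space positions in the scanned band in one comprehension and pick the one nearest the middle (ties to the right) with min and a (distance, -position) key.
import Mathlib
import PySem

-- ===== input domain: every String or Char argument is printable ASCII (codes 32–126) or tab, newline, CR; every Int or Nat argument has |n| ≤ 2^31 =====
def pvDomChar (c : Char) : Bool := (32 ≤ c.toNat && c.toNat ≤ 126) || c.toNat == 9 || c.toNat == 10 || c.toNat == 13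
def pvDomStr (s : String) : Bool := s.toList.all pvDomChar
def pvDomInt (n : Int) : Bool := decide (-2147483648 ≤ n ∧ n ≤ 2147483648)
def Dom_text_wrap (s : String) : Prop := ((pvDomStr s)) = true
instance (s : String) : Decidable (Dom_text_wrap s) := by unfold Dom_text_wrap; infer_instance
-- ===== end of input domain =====

-- B replaces A's outward two-pointer scan by "collect space positions in the band, then
-- select the one nearest the middle (ties to the right) by a min with key" — simpler decomposition.

-- ===== PORT A =====
-- A's loop `for j in range(i): if s[i+j]==' ': …return… elif s[i-j]==' ': …return…`
-- as a structural recursion on j returning the split position (none = loop fell through).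
def pvAloop (cs : List Char) (i j : Nat) : Option Nat :=
  if _h : j < i then
    if cs[i + j]? = some ' ' then some (i + j)
    else if cs[i - j]? = some ' ' then some (i - j)
    else pvAloop cs i (j + 1)
  else none
termination_by i - j

def text_wrap (s : String) : String :=
  let cs := s.toList
  if 14 < cs.length then
    let i := cs.length / 2
    match pvAloop cs i 0 with
    -- s[:p] + '\n' + s[p+1:] — exact as take/drop since 0 ≤ p < len(s)
    | some p => String.ofList (cs.take p ++ '\n' :: cs.drop (p + 1))
    | none => s
  else s

-- ===== PORT B =====
def text_wrap_alt (s : String) : String :=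
  let cs := s.toList
  if cs.length ≤ 14 then s
  else
    let i : Int := PySem.Int.floordiv (cs.length : Int) 2
    -- [p for p in range(1, 2*i) if s[p] == ' ']
    let spaces := (PySem.List.pyRange 1 (2 * i)).filter (fun p => PySem.List.pyGet? cs p == some ' ')
    -- `if not spaces: return s` and `min(spaces, key=lambda p: (abs(p-i), -p))`:
    -- min2? is Python's min with a tuple key; it is none exactly on the empty list
    match PySem.List.min2? spaces (fun p => |p - i|) (fun p => -p) with
    | none => s
    -- s[:p] + '\n' + s[p+1:] — exact as take/drop since 0 ≤ p < len(s)
    | some p => String.ofList (cs.take p.toNat ++ '\n' :: cs.drop (p.toNat + 1))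

-- ===== PRECONDITION & SPEC =====
def Spec_text_wrap (s : String) (out : String) : Prop := out = text_wrap_alt s
instance (s : String) (out : String) : Decidable (Spec_text_wrap s out) := by unfold Spec_text_wrap; infer_instance

-- ===== CLAIM (what is proved, stated in full; the proofs are below) =====
def Claim_equal_text_wrap : Prop := ∀ (s : String), Dom_text_wrap s → Spec_text_wrap s (text_wrap s)

-- ===== LEMMAS AND PROOFS =====

-- If the scan falls through, no scanned index holds a space.
lemma pvAloop_none (cs : List Char) (i : Nat) :
    ∀ j, pvAloop cs i j = none → ∀ k, j ≤ k → k < i →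
      cs[i + k]? ≠ some ' ' ∧ cs[i - k]? ≠ some ' ' := by
  intro j
  induction j using pvAloop.induct cs i with
  | case1 j hj hsp => intro h; rw [pvAloop, dif_pos hj, if_pos hsp] at h; exact absurd h (by simp)
  | case2 j hj hsp1 hsp2 => intro h; rw [pvAloop, dif_pos hj, if_neg hsp1, if_pos hsp2] at h
                            exact absurd h (by simp)
  | case3 j hj hsp1 hsp2 ih =>
      intro h k hjk hk
      rw [pvAloop, dif_pos hj, if_neg hsp1, if_neg hsp2] at h
      rcases Nat.eq_or_lt_of_le hjk with rfl | hlt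
      · exact ⟨hsp1, hsp2⟩
      · exact ih h k hlt hk
  | case4 j hj => intro _ k hjk hk; omega

-- If the scan returns p, p holds a space, lies at distance k from the middle with the
-- right side preferred on ties, and every strictly closer scanned index is not a space.
lemma pvAloop_some (cs : List Char) (i : Nat) :
    ∀ j p, pvAloop cs i j = some p →
      cs[p]? = some ' ' ∧ ∃ k, j ≤ k ∧ k < i ∧
        (p = i + k ∨ (p = i - k ∧ cs[i + k]? ≠ some ' ')) ∧
        (∀ k', j ≤ k' → k' < k → cs[i + k']? ≠ some ' ' ∧ cs[i - k']? ≠ some ' ') := by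
  intro j
  induction j using pvAloop.induct cs i with
  | case1 j hj hsp =>
      intro p h; rw [pvAloop, dif_pos hj, if_pos hsp] at h
      obtain rfl : i + j = p := by simpa using h
      exact ⟨hsp, j, le_refl _, hj, Or.inl rfl, fun k' h1 h2 => by omega⟩
  | case2 j hj hsp1 hsp2 =>
      intro p h; rw [pvAloop, dif_pos hj, if_neg hsp1, if_pos hsp2] at h
      obtain rfl : i - j = p := by simpa using h
      exact ⟨hsp2, j, le_refl _, hj, Or.inr ⟨rfl, hsp1⟩, fun k' h1 h2 => by omega⟩
  | case3 j hj hsp1 hsp2 ih =>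
      intro p h
      rw [pvAloop, dif_pos hj, if_neg hsp1, if_neg hsp2] at h
      obtain ⟨hp, k, hk1, hk2, hk3, hk4⟩ := ih p h
      refine ⟨hp, k, by omega, hk2, hk3, fun k' h1 h2 => ?_⟩
      rcases Nat.eq_or_lt_of_le h1 with rfl | hlt
      · exact ⟨hsp1, hsp2⟩
      · exact hk4 k' hlt h2
  | case4 j hj => intro p h; rw [pvAloop, dif_neg hj] at h; exact absurd h (by simp)

-- the strict lexicographic order of the (abs(p-i), -p) key
def pvLt (i p q : Int) : Prop := |p - i| < |q - i| ∨ (|p - i| = |q - i| ∧ -p < -q)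

lemma pvLt_of_cond (i p q : Int)
    (h : (decide (|p - i| < |q - i|) || (!decide (|q - i| < |p - i|) && decide (-p < -q))) = true) :
    pvLt i p q := by
  unfold pvLt
  simp only [Bool.or_eq_true, Bool.and_eq_true, Bool.not_eq_true', decide_eq_true_iff,
    decide_eq_false_iff_not] at h ⊢
  rw [Int.abs_eq_natAbs, Int.abs_eq_natAbs] at h ⊢
  omega

lemma cond_of_pvLt (i p q : Int) (h : pvLt i p q) :
    (decide (|p - i| < |q - i|) || (!decide (|q - i| < |p - i|) && decide (-p < -q))) = true := by
  unfold pvLt at h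
  simp only [Bool.or_eq_true, Bool.and_eq_true, Bool.not_eq_true', decide_eq_true_iff,
    decide_eq_false_iff_not]
  rw [Int.abs_eq_natAbs, Int.abs_eq_natAbs] at h ⊢
  omega

lemma pvLt_asymm (i p q : Int) : pvLt i p q → ¬ pvLt i q p := by
  unfold pvLt; rw [Int.abs_eq_natAbs, Int.abs_eq_natAbs]; omega

lemma pvLt_irrefl (i p : Int) : ¬ pvLt i p p := by
  unfold pvLt; omega

-- the step function of the foldl inside min2? with our key
def pvStep (i : Int) (acc : Option Int) (x : Int) : Option Int :=
  match acc with
  | none => some x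
  | some m =>
    if (decide (|x - i| < |m - i|) || (!decide (|m - i| < |x - i|) && decide (-x < -m))) = true
    then some x else some m

lemma min2?_eq_foldl_pvStep (i : Int) (xs : List Int) :
    PySem.List.min2? xs (fun q => |q - i|) (fun q => -q) = xs.foldl (pvStep i) none := by
  unfold PySem.List.min2?
  congr 1
  funext acc x
  cases acc <;> simp only [pvStep]

-- the foldl keeps the unique strict minimizer once it is reached / still ahead
lemma min2_foldl_aux (i : Int) (p : Int) :
    ∀ (xs : List Int) (acc : Option Int),
      (∀ q ∈ xs, q = p ∨ pvLt i p q) →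
      (acc = some p ∨ (p ∈ xs ∧ (acc = none ∨ ∃ m, acc = some m ∧ pvLt i p m))) →
      xs.foldl (pvStep i) acc = some p := by
  intro xs
  induction xs with
  | nil =>
      intro acc _ hinv
      rcases hinv with h | ⟨h, _⟩
      · simpa using h
      · simp at h
  | cons x xs ih =>
      intro acc hall hinv
      rw [List.foldl_cons]
      have hx := hall x (by simp)
      have hall' : ∀ q ∈ xs, q = p ∨ pvLt i p q := fun q hq => hall q (by simp [hq])
      rcases hinv with rfl | ⟨hmem, hacc⟩
      · -- acc = some p : it never gets displaced
        have hcond : (decide (|x - i| < |p - i|) || (!decide (|p - i| < |x - i|) && decide (-x < -p))) = false := by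
          by_contra hc
          rw [Bool.not_eq_false] at hc
          have hlt := pvLt_of_cond i x p hc
          rcases hx with h | h
          · rw [h] at hlt; exact pvLt_irrefl i p hlt
          · exact pvLt_asymm i p x h hlt
        have hstep : pvStep i (some p) x = some p := by
          simp only [pvStep, hcond, Bool.false_eq_true, if_false]
        rw [hstep]
        exact ih (some p) hall' (Or.inl rfl)
      · rcases hacc with rfl | ⟨m, rfl, hpm⟩
        · -- acc = none : head becomes the accumulator
          have hstep : pvStep i none x = some x := rfl
          rw [hstep]
          rcases eq_or_ne x p with rfl | hne
          · exact ih (some x) hall' (Or.inl rfl)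
          · have hpxs : p ∈ xs := by
              rcases List.mem_cons.mp hmem with rfl | h
              · exact absurd rfl hne
              · exact h
            have hlt : pvLt i p x := by
              rcases hx with rfl | h
              · exact absurd rfl hne
              · exact h
            exact ih (some x) hall' (Or.inr ⟨hpxs, Or.inr ⟨x, rfl, hlt⟩⟩)
        · -- acc = some m with pvLt i p m
          rcases eq_or_ne x p with rfl | hne
          · have hc := cond_of_pvLt i x m hpm
            have hstep : pvStep i (some m) x = some x := by
              simp only [pvStep, hc, if_true]
            rw [hstep]
            exact ih (some x) hall' (Or.inl rfl)
          · have hpxs : p ∈ xs := by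
              rcases List.mem_cons.mp hmem with rfl | h
              · exact absurd rfl hne
              · exact h
            have hlt : pvLt i p x := by
              rcases hx with rfl | h
              · exact absurd rfl hne
              · exact h
            by_cases hc : (decide (|x - i| < |m - i|) || (!decide (|m - i| < |x - i|) && decide (-x < -m))) = true
            · have hstep : pvStep i (some m) x = some x := by
                simp only [pvStep, hc, if_true]
              rw [hstep]
              exact ih (some x) hall' (Or.inr ⟨hpxs, Or.inr ⟨x, rfl, hlt⟩⟩)
            · have hstep : pvStep i (some m) x = some m := by
                rw [Bool.not_eq_true] at hc
                simp only [pvStep, hc, Bool.false_eq_true, if_false]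
              rw [hstep]
              exact ih (some m) hall' (Or.inr ⟨hpxs, Or.inr ⟨m, rfl, hpm⟩⟩)

lemma min2_unique (i : Int) (xs : List Int) (p : Int) (hp : p ∈ xs)
    (h : ∀ q ∈ xs, q ≠ p → pvLt i p q) :
    PySem.List.min2? xs (fun q => |q - i|) (fun q => -q) = some p := by
  have hall : ∀ q ∈ xs, q = p ∨ pvLt i p q := fun q hq => by
    rcases eq_or_ne q p with rfl | hne
    · exact Or.inl rfl
    · exact Or.inr (h q hq hne)
  rw [min2?_eq_foldl_pvStep]
  exact min2_foldl_aux i p xs none hall (Or.inr ⟨hp, Or.inl rfl⟩)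

-- ===== VERDICT (by name: the statement is the Claim_ definition above) =====
theorem text_wrap_spec : Claim_equal_text_wrap := by
  intro s _
  unfold Spec_text_wrap
  simp only [text_wrap, text_wrap_alt]
  by_cases hlen : 14 < s.toList.length
  · rw [if_pos hlen, if_neg (by omega)]
    set cs := s.toList with hcs
    set n := cs.length with hn
    set i : Nat := n / 2 with hi
    have hii : PySem.Int.floordiv (n : Int) 2 = (i : Int) := by
      rw [PySem.Int.floordiv_eq_ediv_of_pos (by omega)]
      rw [hi]; exact (Int.natCast_div n 2).symm
    rw [hii]
    have hin : 7 ≤ i := by omega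
    have h2i : 2 * i ≤ n := by omega
    -- membership in the filtered band
    have hmem : ∀ q : Int, (q ∈ (PySem.List.pyRange 1 (2 * (i : Int))).filter
        (fun p => PySem.List.pyGet? cs p == some ' ')) ↔
        (1 ≤ q ∧ q < 2 * (i : Int) ∧ cs[q.toNat]? = some ' ') := by
      intro q
      rw [List.mem_filter, PySem.List.mem_pyRange_one]
      constructor
      · rintro ⟨⟨h1, h2⟩, h3⟩
        refine ⟨h1, h2, ?_⟩
        have : q = ((q.toNat : Nat) : Int) := by omega
        rw [this, PySem.List.pyGet?_natCast] at h3
        simpa using h3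
      · rintro ⟨h1, h2, h3⟩
        refine ⟨⟨h1, h2⟩, ?_⟩
        have : q = ((q.toNat : Nat) : Int) := by omega
        rw [this, PySem.List.pyGet?_natCast]
        simpa using h3
    cases hloop : pvAloop cs i 0 with
    | none =>
        -- no space anywhere in the band: the filter is empty and min2? is none
        have hnil : (PySem.List.pyRange 1 (2 * (i : Int))).filter
            (fun p => PySem.List.pyGet? cs p == some ' ') = [] := by
          rcases h : (PySem.List.pyRange 1 (2 * (i : Int))).filter
              (fun p => PySem.List.pyGet? cs p == some ' ') with _ | ⟨q, t⟩
          · rfl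
          · exfalso
            have hq : q ∈ (PySem.List.pyRange 1 (2 * (i : Int))).filter
                (fun p => PySem.List.pyGet? cs p == some ' ') := by rw [h]; simp
            obtain ⟨h1, h2, h3⟩ := (hmem q).mp hq
            set qn := q.toNat with hqn
            have hb : 1 ≤ qn ∧ qn < 2 * i := by omega
            by_cases hge : i ≤ qn
            · have := (pvAloop_none cs i 0 hloop (qn - i) (by omega) (by omega)).1
              have heq : i + (qn - i) = qn := by omega
              rw [heq] at this; exact this h3
            · have := (pvAloop_none cs i 0 hloop (i - qn) (by omega) (by omega)).2
              have heq : i - (i - qn) = qn := by omega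
              rw [heq] at this; exact this h3
        rw [hnil]
        rfl
    | some p =>
        obtain ⟨hsp, k, -, hk2, hshape, hinv⟩ := pvAloop_some cs i 0 p hloop
        have hpb : 1 ≤ p ∧ p < 2 * i := by rcases hshape with rfl | ⟨rfl, -⟩ <;> omega
        have hminres : PySem.List.min2?
            ((PySem.List.pyRange 1 (2 * (i : Int))).filter (fun q => PySem.List.pyGet? cs q == some ' '))
            (fun q => |q - (i : Int)|) (fun q => -q) = some ((p : Int)) := by
          apply min2_unique
          · exact (hmem (p : Int)).mpr ⟨by omega, by omega, by simpa using hsp⟩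
          · intro q hq hne
            obtain ⟨h1, h2, h3⟩ := (hmem q).mp hq
            set qn := q.toNat with hqn
            have hqe : q = ((qn : Nat) : Int) := by omega
            have hqnp : qn ≠ p := by omega
            have hpk : |(p : Int) - (i : Int)| = (k : Int) := by
              rw [Int.abs_eq_natAbs]
              rcases hshape with hsh | ⟨hsh, -⟩ <;> omega
            rcases Nat.lt_or_ge qn i with hlt | hge
            · -- q left of the middle, at distance i - qn
              have hq3 : cs[i - (i - qn)]? = some ' ' := by
                rw [show i - (i - qn) = qn by omega]; exact h3
              have hdk : ¬ i - qn < k := fun hdk => (hinv (i - qn) (by omega) hdk).2 hq3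
              have hqk : |q - (i : Int)| = ((i - qn : Nat) : Int) := by
                rw [hqe, Int.abs_eq_natAbs]; omega
              unfold pvLt
              rw [hpk, hqk, hqe]
              rcases hshape with hsh | ⟨hsh, -⟩ <;> omega
            · -- q right of the middle, at distance qn - i
              have hq3 : cs[i + (qn - i)]? = some ' ' := by
                rw [show i + (qn - i) = qn by omega]; exact h3
              have hdk : ¬ qn - i < k := fun hdk => (hinv (qn - i) (by omega) hdk).1 hq3
              have hqk : |q - (i : Int)| = ((qn - i : Nat) : Int) := by
                rw [hqe, Int.abs_eq_natAbs]; omega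
              unfold pvLt
              rw [hpk, hqk, hqe]
              rcases Nat.lt_or_ge k (qn - i) with h | h
              · left; omega
              · -- equal distance: qn = i + k, so p = i - k with a space at the right mirror — impossible
                have hqn' : qn = i + k := by omega
                rcases hshape with hsh | ⟨hsh, hns⟩
                · omega
                · exact absurd (by rw [show i + k = qn by omega]; exact h3) hns
        rw [hminres]
        simp
  · rw [if_neg hlen, if_pos (by omega)]
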